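-- pv_equiv track=rewrite | github.com/muchaco/table_generrator | tests/__init__.py | generate_default_rows
-- ===== SOURCE A (Python) =====
-- import string
--
-- def generate_default_rows(n):
--     """
--     returning n rows that are properly constructed for the generated rules
--     """
--     rows = []
--
--     for i in range(n):
--         raw_row = [
--             j % n + 1
--             for j in range(i, n + i)
--         ]
--         row = {
--             string.ascii_lowercase[i]: raw_row[i]
--             for i in range(0, n)
--         }
--         rows.append(row)
--
--     return rows
-- ===== SOURCE B (Python) =====
-- import string
--
--
-- def generate_default_rows(n):
--     letters = string.ascii_lowercase[:n]
--     base = list(range(1, n + 1))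
--     rows = []
--     for _ in range(n):
--         rows.append(dict(zip(letters, base)))
--         base = base[1:] + base[:1]
--     return rows
-- ===== Notes on version B (the rewrite author's own statement) =====
-- stated objective: alternative
-- what changed: Instead of recomputing each cell with a per-row range(i,n+i) comprehension and a modulo per cell, B builds the base row [1..n] once and rotates it left between rows, zipping it with the letter prefix ascii_lowercase[:n]; Pre_ excludes n > 26, where A raises IndexError on string.ascii_lowercase[k].
import Mathlib
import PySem

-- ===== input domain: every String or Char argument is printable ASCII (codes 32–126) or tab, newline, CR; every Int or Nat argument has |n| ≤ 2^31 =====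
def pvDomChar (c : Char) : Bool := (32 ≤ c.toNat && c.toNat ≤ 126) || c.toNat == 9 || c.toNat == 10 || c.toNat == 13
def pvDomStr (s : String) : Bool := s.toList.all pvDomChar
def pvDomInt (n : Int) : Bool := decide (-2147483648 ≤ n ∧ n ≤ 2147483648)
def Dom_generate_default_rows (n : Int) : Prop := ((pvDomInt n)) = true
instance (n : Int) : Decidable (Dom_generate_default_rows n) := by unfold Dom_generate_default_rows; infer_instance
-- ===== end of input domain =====

-- B replaces the per-cell modular arithmetic (a fresh range(i, n+i) comprehension per row) with one
-- base row [1..n] that is rotated left between rows (objective: alternative decomposition, same cost).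

def pvAsciiLower : String := "abcdefghijklmnopqrstuvwxyz"

-- ===== PORT A =====
-- raw_row = [j % n + 1 for j in range(i, n + i)]
def pvRawRow (n i : Int) : List Int :=
  (PySem.List.pyRange i (n + i) 1).map (fun j => PySem.Int.mod j n + 1)

-- string.ascii_lowercase[k]  (none = IndexError, unreachable under Pre_ : n ≤ 26)
def pvKey (k : Int) : String :=
  match PySem.Str.pyGet? pvAsciiLower k with
  | some c => String.ofList [c]
  | none => ""

-- row = {string.ascii_lowercase[k]: raw_row[k] for k in range(0, n)}
def pvRowA (n i : Int) : PySem.Dict String Int :=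
  (PySem.List.pyRange 0 n 1).foldl
    (fun d k => d.insert (pvKey k) (PySem.List.pyGetD (pvRawRow n i) k 0)) PySem.Dict.empty

-- rows = []; for i in range(n): ... rows.append(row); return rows
def generate_default_rows (n : Int) : List (List (String × Int)) :=
  (PySem.List.pyRange 0 n 1).foldl (fun rows i => rows ++ [(pvRowA n i).items]) []

-- ===== PORT B =====
-- letters = string.ascii_lowercase[:n]  (iterated as 1-char strings by zip)
def pvLetters (n : Int) : List String :=
  (PySem.Str.slice pvAsciiLower none (some n)).toList.map (fun c => String.ofList [c])

-- dict(zip(letters, base))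
def pvDictZip (letters : List String) (base : List Int) : PySem.Dict String Int :=
  (letters.zip base).foldl (fun d p => d.insert p.1 p.2) PySem.Dict.empty

-- base = base[1:] + base[:1]
def pvRot (b : List Int) : List Int := b.drop 1 ++ b.take 1

-- rows = []; base = list(range(1, n+1)); for _ in range(n): rows.append(dict(zip(letters, base))); rotate
def generate_default_rows_alt (n : Int) : List (List (String × Int)) :=
  ((PySem.List.pyRange 0 n 1).foldl
    (fun (st : List (List (String × Int)) × List Int) _ =>
      (st.1 ++ [(pvDictZip (pvLetters n) st.2).items], pvRot st.2))
    ([], PySem.List.pyRange 1 (n + 1) 1)).1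

-- ===== PRECONDITION & SPEC =====
-- Pre_ excludes n > 26, where A raises IndexError (string.ascii_lowercase[k] out of range).
def Pre_generate_default_rows (n : Int) : Prop := n ≤ 26
instance (n : Int) : Decidable (Pre_generate_default_rows n) := by unfold Pre_generate_default_rows; infer_instance
def pvWitness_generate_default_rows : Int := (4)

def Spec_generate_default_rows (n : Int) (out : List (List (String × Int))) : Prop := out = generate_default_rows_alt n
instance (n : Int) (out : List (List (String × Int))) : Decidable (Spec_generate_default_rows n out) := by unfold Spec_generate_default_rows; infer_instance

-- ===== CLAIM (what is proved, stated in full; the proofs are below) =====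
def Claim_equal_generate_default_rows : Prop := ∀ (n : Int), Dom_generate_default_rows n → Pre_generate_default_rows n → Spec_generate_default_rows n (generate_default_rows n)

-- ===== LEMMAS AND PROOFS =====

-- the cyclic value row: pvR n t = [v(t+0), …, v(t+n-1)] with v x = x % n + 1
def pvV (n x : Int) : Int := PySem.Int.mod x n + 1
def pvR (n t : Int) : List Int := (List.range n.toNat).map (fun k : Nat => pvV n (t + (k : Int)))

theorem pv_nonpos (n : Int) (h : n ≤ 0) :
    generate_default_rows n = generate_default_rows_alt n := by
  simp [generate_default_rows, generate_default_rows_alt, PySem.List.pyRange_one_eq_nil h]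

-- A's dict comprehension has fresh distinct keys, so its items are the mapped pairs
theorem pv_rowA_items (n i : Int)
    (hnd : ((PySem.List.pyRange 0 n 1).map pvKey).Nodup) :
    (pvRowA n i).items
      = (PySem.List.pyRange 0 n 1).map
          (fun k => (pvKey k, PySem.List.pyGetD (pvRawRow n i) k 0)) := by
  have h := PySem.Dict.items_foldl_insert_fresh (PySem.List.pyRange 0 n 1) pvKey
    (fun k => PySem.List.pyGetD (pvRawRow n i) k 0) PySem.Dict.empty
    (fun a _ => PySem.Dict.contains_empty _) hnd
  simpa [pvRowA] using h

-- raw_row[k] = (i+k) % n + 1 for 0 ≤ k < n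
theorem pv_rawRow_get (n i k : Int) (hk0 : 0 ≤ k) (hkn : k < n) :
    PySem.List.pyGetD (pvRawRow n i) k 0 = pvV n (i + k) := by
  have hk : k = ((k.toNat : Int)) := (Int.toNat_of_nonneg hk0).symm
  rw [hk, pvRawRow, PySem.List.pyGetD_map_pyRange_one _ i (n + i) k.toNat 0 (by omega)]
  rfl

-- dict(zip(L, b)) with L nodup and L no longer than b has items zip L b
theorem pv_zip_items (L : List String) (b : List Int)
    (hnd : L.Nodup) (hlen : L.length ≤ b.length) :
    (pvDictZip L b).items = L.zip b := by
  have h := PySem.Dict.items_foldl_insert_fresh (L.zip b) Prod.fst Prod.snd PySem.Dict.empty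
    (fun a _ => PySem.Dict.contains_empty _)
    (by rw [List.map_fst_zip hlen]; exact hnd)
  simpa [pvDictZip] using h

-- B's loop unrolled: i-th emitted row uses pvRot^[i] of the initial base
theorem pv_loopB (L : List String) (l : List Int)
    (rows : List (List (String × Int))) (b : List Int) :
    (l.foldl (fun (st : List (List (String × Int)) × List Int) _ =>
        (st.1 ++ [(pvDictZip L st.2).items], pvRot st.2)) (rows, b)).1
      = rows ++ (List.range l.length).map (fun t => (pvDictZip L (pvRot^[t] b)).items) := by
  induction l generalizing rows b with
  | nil => simp
  | cons x xs ih =>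
      simp only [List.foldl_cons, ih, List.length_cons, List.range_succ_eq_map,
        List.map_cons, List.map_map, Function.iterate_zero_apply, List.append_assoc,
        List.singleton_append]
      refine congrArg _ (congrArg _ (List.map_congr_left ?_))
      intro t _
      simp [Function.iterate_succ_apply]

-- rotating the cyclic row advances it by one
theorem pv_rot_step (n t : Int) (h0 : 0 < n) : pvRot (pvR n t) = pvR n (t + 1) := by
  obtain ⟨m, hm⟩ : ∃ m, n.toNat = m + 1 := ⟨n.toNat - 1, by omega⟩
  unfold pvRot pvR
  rw [hm]
  conv_lhs => rw [List.range_succ_eq_map]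
  conv_rhs => rw [List.range_succ]
  simp only [List.map_cons, List.map_map, List.drop_succ_cons, List.drop_zero,
    List.take_succ_cons, List.take_zero, List.map_append, List.map_nil]
  congr 1
  · apply List.map_congr_left
    intro k _
    simp only [Function.comp]
    congr 1
    push_cast
    ring
  · have : pvV n (t + ((0 : Nat) : Int)) = pvV n (t + 1 + (m : Int)) := by
      unfold pvV
      congr 1
      rw [PySem.Int.mod_eq_emod_of_pos h0, PySem.Int.mod_eq_emod_of_pos h0]
      have h2 : t + 1 + (m : Int) = (t + ((0 : Nat) : Int)) + n := by push_cast; omega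
      rw [h2, Int.add_emod_right]
    rw [this]

theorem pv_rot_iter (n : Int) (h0 : 0 < n) (t : Nat) :
    pvRot^[t] (pvR n 0) = pvR n t := by
  induction t with
  | zero => simp
  | succ s ih =>
      rw [Function.iterate_succ_apply', ih, pv_rot_step n s h0]
      norm_num

-- the initial base list(range(1, n+1)) is the cyclic row at t = 0
theorem pv_base (n : Int) (h0 : 0 < n) : PySem.List.pyRange 1 (n + 1) 1 = pvR n 0 := by
  rw [PySem.List.pyRange_one 1 (n + 1), pvR]
  have hlen : (n + 1 - 1).toNat = n.toNat := by omega
  rw [hlen]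
  apply List.map_congr_left
  intro k hk
  have hkn : (k : Int) < n := by
    have := List.mem_range.mp hk
    omega
  simp only [pvV]
  rw [PySem.Int.mod_eq_emod_of_pos h0, Int.emod_eq_of_lt (by omega) (by omega)]
  ring

-- letters agree with A's per-cell indexing, and are distinct (n ∈ [1,26]: 26 small checks)
set_option maxHeartbeats 8000000 in
theorem pv_letters (n : Int) (h1 : 1 ≤ n) (h2 : n ≤ 26) :
    pvLetters n = (PySem.List.pyRange 0 n 1).map pvKey
      ∧ ((PySem.List.pyRange 0 n 1).map pvKey).Nodup := by
  interval_cases n <;> exact ⟨by decide, by decide⟩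

-- one row of A equals letters zipped with the cyclic row
theorem pv_rowA_eq (n i : Int) (h0 : 0 < n)
    (hL : pvLetters n = (PySem.List.pyRange 0 n 1).map pvKey)
    (hnd : ((PySem.List.pyRange 0 n 1).map pvKey).Nodup) :
    (pvRowA n i).items = (pvLetters n).zip (pvR n i) := by
  rw [pv_rowA_items n i hnd]
  have hv : (PySem.List.pyRange 0 n 1).map (fun k => pvV n (i + k)) = pvR n i := by
    rw [PySem.List.pyRange_one 0 n, List.map_map, pvR]
    have : (n - 0).toNat = n.toNat := by omega
    rw [this]
    apply List.map_congr_left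
    intro k _
    simp [Function.comp]
  calc (PySem.List.pyRange 0 n 1).map
          (fun k => (pvKey k, PySem.List.pyGetD (pvRawRow n i) k 0))
      = (PySem.List.pyRange 0 n 1).map (fun k => (pvKey k, pvV n (i + k))) := by
        apply List.map_congr_left
        intro k hk
        obtain ⟨hk0, hkn⟩ := PySem.List.mem_pyRange_one.mp hk
        rw [pv_rawRow_get n i k hk0 hkn]
    _ = ((PySem.List.pyRange 0 n 1).map pvKey).zip
          ((PySem.List.pyRange 0 n 1).map (fun k => pvV n (i + k))) := List.zip_map'.symm
    _ = (pvLetters n).zip (pvR n i) := by rw [← hL, hv]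

-- ===== VERDICT (by name: the statement is the Claim_ definition above) =====
theorem generate_default_rows_spec : Claim_equal_generate_default_rows := by
  intro n _ hpre
  unfold Spec_generate_default_rows
  by_cases h : n ≤ 0
  · exact pv_nonpos n h
  · have h0 : 0 < n := by omega
    obtain ⟨hL, hnd⟩ := pv_letters n (by omega) hpre
    have hlenL : (pvLetters n).length = n.toNat := by
      rw [hL, List.length_map, PySem.List.length_pyRange_one]
      omega
    -- B side
    rw [generate_default_rows_alt, pv_loopB, List.nil_append,
      PySem.List.length_pyRange_one, pv_base n h0]
    have hB : ∀ t : Nat, (pvDictZip (pvLetters n) (pvRot^[t] (pvR n 0))).items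
        = (pvLetters n).zip (pvR n t) := by
      intro t
      rw [pv_rot_iter n h0 t]
      exact pv_zip_items _ _ (hL ▸ hnd) (by simp [hlenL, pvR])
    -- A side
    rw [generate_default_rows, PySem.List.foldl_append_singleton_eq_map, List.nil_append,
      PySem.List.pyRange_one 0 n, List.map_map]
    have hlen : (n - 0).toNat = n.toNat := by omega
    rw [hlen]
    apply List.map_congr_left
    intro t _
    simp only [Function.comp]
    rw [hB t]
    have : ((0 : Int) + (t : Int)) = (t : Int) := by ring
    rw [this, pv_rowA_eq n t h0 hL hnd]
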